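-- pv_equiv track=rewrite | github.com/liupengsay/PyIsTheBestLang | src/graph/binary_search_tree/template.py | build_with_stack
-- ===== SOURCE A (Python) =====
-- def build_with_stack(nums):
--     """build binary search tree by the order of nums with stack"""
--
--     n = len(nums)
--
--     lst = sorted(nums)
--     dct = {num: i + 1 for i, num in enumerate(lst)}
--     ind = {num: i for i, num in enumerate(nums)}
--
--     order = [dct[i] for i in nums]
--     father, occur, stack = [0] * (n + 1), [0] * (n + 1), []
--     deep = [0] * (n + 1)
--     for i, x in enumerate(order, 1):
--         occur[x] = i
--
--     for x, i in enumerate(occur):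
--         while stack and occur[stack[-1]] > i:
--             if occur[father[stack[-1]]] < i:
--                 father[stack[-1]] = x
--             stack.pop()
--         if stack:
--             father[x] = stack[-1]
--         stack.append(x)
--
--     for x in order:
--         deep[x] = 1 + deep[father[x]]
--
--     dct = [[] for _ in range(n)]
--     for i in range(1, n + 1):
--         if father[i]:
--             u, v = father[i] - 1, i - 1
--             x, y = ind[lst[u]], ind[lst[v]]
--             dct[x].append(y)
--     return dct
-- ===== SOURCE B (Python) =====
-- def build_with_stack(nums):
--     """Build the same BST adjacency directly from the classical parent rule:
--     the parent of a value is the nearer-in-value neighbour (predecessor or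
--     successor) among earlier-inserted values, namely the one inserted later."""
--     n = len(nums)
--     pos = {v: i for i, v in enumerate(nums)}
--     adj = [[] for _ in range(n)]
--     for v in sorted(set(nums)):
--         i = pos[v]
--         lower = [u for u in nums if u < v and pos[u] < i]
--         upper = [u for u in nums if u > v and pos[u] < i]
--         lo = max(lower) if lower else None
--         hi = min(upper) if upper else None
--         if lo is None and hi is None:
--             continue
--         if hi is None or (lo is not None and pos[lo] > pos[hi]):
--             p = lo
--         else:
--             p = hi
--         adj[pos[p]].append(i)
--     return adj
-- ===== Notes on version B (the rewrite author's own statement) =====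
-- stated objective: alternative
-- what changed: Replaces A's sorted-rank + monotonic-stack construction by the classical direct BST parent rule: each value's parent is the later-inserted of its value-predecessor and value-successor among earlier-inserted values, computed per node by direct scans; the rank/occur/stack machinery disappears. Pre_ excludes lists with repeated values, on which A's value-to-rank dict collapses equal keys and yields self-edge adjacency while B merges duplicates into one node.
-- outside the precondition, e.g. on build_with_stack([1, 1]): A returns [[], [1]], B returns [[], []]; on build_with_stack([3, 1, 3]): A returns [[], [], [2]], B returns [[], [2], []]
import Mathlib
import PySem

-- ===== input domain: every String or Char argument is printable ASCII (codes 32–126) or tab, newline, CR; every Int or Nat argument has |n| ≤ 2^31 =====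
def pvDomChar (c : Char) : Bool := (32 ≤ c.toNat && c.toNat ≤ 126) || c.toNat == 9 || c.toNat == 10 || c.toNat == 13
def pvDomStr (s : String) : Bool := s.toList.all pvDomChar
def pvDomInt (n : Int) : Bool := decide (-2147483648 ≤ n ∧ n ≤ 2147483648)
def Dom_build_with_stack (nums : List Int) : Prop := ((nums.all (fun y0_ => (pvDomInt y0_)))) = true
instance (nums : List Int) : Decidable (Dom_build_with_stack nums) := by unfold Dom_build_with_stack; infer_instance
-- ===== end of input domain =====

-- B replaces A's sorted-rank + monotonic-stack construction by the classical direct BST parent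
-- rule (parent of v = the later-inserted of v's value-predecessor and value-successor among
-- earlier-inserted values); objective: alternative algorithm.

-- ===== PORT A =====

-- lst[i] = v (Python list item assignment; exact for the in-range indices that A and B reach)
def pvSetItem {α : Type} (l : List α) (i : Int) (v : α) : List α :=
  match PySem.List.pyIdx? l.length i with
  | some k => l.set k v
  | none => l

-- the inner `while stack and occur[stack[-1]] > i:` loop of A; the Python stack's
-- end (stack[-1]) is the HEAD of the Lean list, so append/pop act on the head
def pvPopLoop (occur : List Int) (i x : Int) : List Int → List Int → List Int × List Int
  | father, [] => (father, [])
  | father, t :: rest =>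
      if i < PySem.List.pyGetD occur t 0 then
        let father' := if PySem.List.pyGetD occur (PySem.List.pyGetD father t 0) 0 < i then pvSetItem father t x else father
        pvPopLoop occur i x father' rest
      else (father, t :: rest)

-- the body of A's `for x, i in enumerate(occur):` loop
def stStep (oc : List Int) (fs : List Int × List Int) (p : Int × Int) : List Int × List Int :=
  let popped := pvPopLoop oc p.2 p.1 fs.1 fs.2
  let father := match popped.2 with | [] => popped.1 | t :: _ => pvSetItem popped.1 p.1 t
  (father, p.1 :: popped.2)

def build_with_stack (nums : List Int) : List (List Int) :=
  let n : Int := (nums.length : Int)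
  let lst := PySem.List.sorted nums (fun x => x)
  let dct : PySem.Dict Int Int := (PySem.List.enumerate lst).foldl (fun d p => d.insert p.2 (p.1 + 1)) PySem.Dict.empty
  let ind : PySem.Dict Int Int := (PySem.List.enumerate nums).foldl (fun d p => d.insert p.2 p.1) PySem.Dict.empty
  let order := nums.map (fun v => dct.getD v 0)   -- dct[i]: every key is present, so getD is exact
  let father0 := List.replicate (n.toNat + 1) (0 : Int)
  let occur0 := List.replicate (n.toNat + 1) (0 : Int)
  let occur := (PySem.List.enumerate order 1).foldl (fun oc p => pvSetItem oc p.2 p.1) occur0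
  let fs := (PySem.List.enumerate occur).foldl (stStep occur) (father0, [])
  let father := fs.1
  -- `deep` is computed by A but never used for its result; ported for fidelity
  let _deep := order.foldl (fun dp x => pvSetItem dp x (1 + PySem.List.pyGetD dp (PySem.List.pyGetD father x 0) 0)) (List.replicate (n.toNat + 1) (0 : Int))
  (PySem.List.pyRange 1 (n + 1)).foldl (fun adj i =>
      let fi := PySem.List.pyGetD father i 0
      if fi ≠ 0 then
        let u := fi - 1
        let v := i - 1
        let x := ind.getD (PySem.List.pyGetD lst u 0) 0
        let y := ind.getD (PySem.List.pyGetD lst v 0) 0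
        pvSetItem adj x (PySem.List.pyGetD adj x [] ++ [y])
      else adj) (List.replicate n.toNat ([] : List Int))

-- ===== PORT B =====

def build_with_stack_alt (nums : List Int) : List (List Int) :=
  let n := nums.length
  let pos : PySem.Dict Int Int := (PySem.List.enumerate nums).foldl (fun d p => d.insert p.2 p.1) PySem.Dict.empty
  (PySem.List.sorted (PySem.Set.ofList nums) (fun x => x)).foldl (fun adj v =>
      let i := pos.getD v 0
      let lower := nums.filter (fun u => decide (u < v) && decide (pos.getD u 0 < i))
      let upper := nums.filter (fun u => decide (v < u) && decide (pos.getD u 0 < i))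
      match PySem.List.max? lower (fun x => x), PySem.List.min? upper (fun x => x) with
      | none, none => adj
      | some lo, none =>
          pvSetItem adj (pos.getD lo 0) (PySem.List.pyGetD adj (pos.getD lo 0) [] ++ [i])
      | none, some hi =>
          pvSetItem adj (pos.getD hi 0) (PySem.List.pyGetD adj (pos.getD hi 0) [] ++ [i])
      | some lo, some hi =>
          let p := if pos.getD hi 0 < pos.getD lo 0 then lo else hi
          pvSetItem adj (pos.getD p 0) (PySem.List.pyGetD adj (pos.getD p 0) [] ++ [i]))
    (List.replicate n ([] : List Int))

-- ===== PRECONDITION & SPEC =====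

-- Pre_ excludes lists with repeated values: on them equal values collapse to a single key in
-- A's value→rank dict, a degenerate unspecified corner of a BST builder on which A emits
-- self-edges and stray edges, while B merges equal values into one node keyed by the last
-- occurrence; e.g. on the cited input [1, 1] A makes node 1 its own child and B leaves both
-- adjacency lists empty.
def Pre_build_with_stack (nums : List Int) : Prop := nums.Nodup
instance (nums : List Int) : Decidable (Pre_build_with_stack nums) := by unfold Pre_build_with_stack; infer_instance

def pvWitness_build_with_stack : List Int := [5, 3, 8, 1]

def Spec_build_with_stack (nums : List Int) (out : List (List Int)) : Prop := out = build_with_stack_alt nums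
instance (nums : List Int) (out : List (List Int)) : Decidable (Spec_build_with_stack nums out) := by unfold Spec_build_with_stack; infer_instance

-- ===== CLAIM (what is proved, stated in full; the proofs are below) =====
def Claim_equal_build_with_stack : Prop := ∀ (nums : List Int), Dom_build_with_stack nums → Pre_build_with_stack nums → Spec_build_with_stack nums (build_with_stack nums)

-- ===== LEMMAS AND PROOFS =====

theorem pvPopLoop_cons (oc : List Int) (i x : Int) (fa : List Int) (t : Int) (rest : List Int) :
    pvPopLoop oc i x fa (t :: rest)
      = if i < PySem.List.pyGetD oc t 0 then
          pvPopLoop oc i x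
            (if PySem.List.pyGetD oc (PySem.List.pyGetD fa t 0) 0 < i then pvSetItem fa t x else fa)
            rest
        else (fa, t :: rest) := rfl


def pvG {α : Type} (l : List α) (y : Nat) (d : α) : α := PySem.List.pyGetD l (y : Int) d

theorem pvG_eq_getD {α : Type} (l : List α) (y : Nat) (d : α) : pvG l y d = l.getD y d :=
  PySem.List.pyGetD_natCast l y d

theorem pvSetItem_cast {α : Type} (l : List α) (j : Nat) (v : α) (hj : j < l.length) :
    pvSetItem l (j : Int) v = l.set j v := by
  unfold pvSetItem PySem.List.pyIdx?
  simp [hj]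

theorem pvSetItem_length {α : Type} (l : List α) (i : Int) (v : α) :
    (pvSetItem l i v).length = l.length := by
  unfold pvSetItem
  cases PySem.List.pyIdx? l.length i <;> simp

theorem pvG_set {α : Type} (l : List α) (j k : Nat) (v d : α) (hj : j < l.length) :
    pvG (l.set j v) k d = if j = k then v else pvG l k d := by
  simp only [pvG_eq_getD, List.getD, List.getElem?_set]
  by_cases h : j = k
  · subst h; simp [hj]
  · simp [h]

theorem pvG_pvSetItem {α : Type} (l : List α) (j k : Nat) (v d : α) (hj : j < l.length) :
    pvG (pvSetItem l (j : Int) v) k d = if j = k then v else pvG l k d := by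
  rw [pvSetItem_cast _ _ _ hj, pvG_set _ _ _ _ _ hj]

theorem pvG_replicate {α : Type} (m k : Nat) (c d : α) (h : k < m) :
    pvG (List.replicate m c) k d = c := by
  simp [pvG_eq_getD, List.getD, h]

theorem pvDictFold_getD_not_mem (g : Int → Int) (xs : List Int) (s : Int)
    (d : PySem.Dict Int Int) (v : Int) (hv : v ∉ xs) :
    ((PySem.List.enumerate xs s).foldl (fun d p => d.insert p.2 (g p.1)) d).getD v 0 = d.getD v 0 := by
  induction xs generalizing s d with
  | nil => simp [PySem.List.enumerate_nil]
  | cons x t ih =>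
      rw [PySem.List.enumerate_cons]
      simp only [List.foldl_cons]
      rw [ih (s + 1) _ (by intro h; exact hv (List.mem_cons_of_mem _ h))]
      rw [PySem.Dict.getD_insert]
      simp only [List.mem_cons, not_or] at hv
      simp [hv.1]

theorem pvDictFold_getD (g : Int → Int) (xs : List Int) (s : Int)
    (d : PySem.Dict Int Int) (v : Int) (hnd : xs.Nodup) (hv : v ∈ xs) :
    ((PySem.List.enumerate xs s).foldl (fun d p => d.insert p.2 (g p.1)) d).getD v 0
      = g (s + (xs.idxOf v : Int)) := by
  induction xs generalizing s d with
  | nil => simp at hv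
  | cons x t ih =>
      rw [PySem.List.enumerate_cons]
      simp only [List.foldl_cons]
      rcases List.mem_cons.1 hv with h | h
      · subst h
        rw [pvDictFold_getD_not_mem _ _ _ _ _ ((List.nodup_cons.1 hnd).1)]
        rw [PySem.Dict.getD_insert]
        simp
      · have hne : v ≠ x := by rintro rfl; exact ((List.nodup_cons.1 hnd).1) h
        rw [ih (s + 1) _ (List.Nodup.of_cons hnd) h]
        rw [List.idxOf_cons]
        have : (x == v) = false := by simp [Ne.symm hne]
        simp only [this, cond_false]
        push_cast
        ring_nf

theorem pvSet_foldl_add_eq (xs acc : List Int) (hnd : (acc ++ xs).Nodup) :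
    xs.foldl PySem.Set.add acc = acc ++ xs := by
  induction xs generalizing acc with
  | nil => simp
  | cons x t ih =>
      simp only [List.foldl_cons]
      have hmem : x ∉ acc := by
        intro hmem
        exact (List.disjoint_of_nodup_append hnd) hmem (by simp)
      have hx : PySem.Set.add acc x = acc ++ [x] := by
        show (if acc.contains x then acc else acc ++ [x]) = acc ++ [x]
        simp [hmem]
      rw [hx, ih]
      · simp
      · simpa using hnd

theorem pvSet_ofList_eq_self (xs : List Int) (hnd : xs.Nodup) :
    PySem.Set.ofList xs = xs := by
  show xs.foldl PySem.Set.add PySem.Set.empty = xs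
  have := pvSet_foldl_add_eq xs [] (by simpa using hnd)
  simpa using this

def pvLst (nums : List Int) : List Int := PySem.List.sorted nums (fun x => x)
def pvVal (nums : List Int) (r : Nat) : Int := pvG (pvLst nums) (r - 1) 0
def pvIdx (nums : List Int) (v : Int) : Int := (nums.idxOf v : Int)
def pvO (nums : List Int) (r : Nat) : Int := if r = 0 then 0 else pvIdx nums (pvVal nums r) + 1
def pvL (nums : List Int) (r : Nat) : Nat := Nat.findGreatest (fun l => pvO nums l < pvO nums r) (r - 1)
def pvR (nums : List Int) (r : Nat) : Option Nat :=
  ((List.range' (r + 1) (nums.length - r)).filter (fun h => decide (pvO nums h < pvO nums r))).head?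
def pvF (nums : List Int) (r : Nat) : Nat :=
  match pvR nums r with
  | none => pvL nums r
  | some h => if pvO nums (pvL nums r) < pvO nums h then h else pvL nums r

theorem pvLst_nodup (nums : List Int) (hnd : nums.Nodup) : (pvLst nums).Nodup :=
  List.Perm.nodup (PySem.List.sorted_perm nums (fun x => x) false).symm hnd

theorem pvLst_length (nums : List Int) : (pvLst nums).length = nums.length :=
  PySem.List.length_sorted nums (fun x => x) false

theorem pvLst_pairwise (nums : List Int) (hnd : nums.Nodup) : (pvLst nums).Pairwise (· < ·) := by
  have h1 := PySem.List.sorted_pairwise nums (fun x => x)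
  have := List.Pairwise.and h1 (pvLst_nodup nums hnd)
  exact this.imp (fun h => lt_of_le_of_ne h.1 h.2)

theorem pvVal_getElem (nums : List Int) (r : Nat) (h1 : 1 ≤ r) (h2 : r ≤ nums.length) :
    pvVal nums r = (pvLst nums)[r - 1]'(by rw [pvLst_length]; omega) := by
  unfold pvVal
  rw [pvG_eq_getD, List.getD, List.getElem?_eq_getElem (by rw [pvLst_length]; omega)]
  rfl

theorem pvVal_mem (nums : List Int) (r : Nat) (h1 : 1 ≤ r) (h2 : r ≤ nums.length) :
    pvVal nums r ∈ nums := by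
  rw [pvVal_getElem nums r h1 h2]
  exact (PySem.List.mem_sorted nums (fun x => x) false _).1 (List.getElem_mem _)

theorem pvVal_lt (nums : List Int) (hnd : nums.Nodup) (r q : Nat)
    (h1 : 1 ≤ r) (h2 : r < q) (h3 : q ≤ nums.length) : pvVal nums r < pvVal nums q := by
  rw [pvVal_getElem nums r h1 (by omega), pvVal_getElem nums q (by omega) h3]
  exact List.pairwise_iff_getElem.1 (pvLst_pairwise nums hnd) _ _ _ _ (by omega)

theorem pvVal_inj (nums : List Int) (hnd : nums.Nodup) (r q : Nat)
    (h1 : 1 ≤ r) (h2 : r ≤ nums.length) (h3 : 1 ≤ q) (h4 : q ≤ nums.length)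
    (h : pvVal nums r = pvVal nums q) : r = q := by
  rcases Nat.lt_trichotomy r q with hlt | he | hgt
  · exact absurd h (by have := pvVal_lt nums hnd r q h1 hlt h4; omega)
  · exact he
  · exact absurd h (by have := pvVal_lt nums hnd q r h3 hgt h2; omega)

theorem pvVal_surj (nums : List Int) (v : Int) (hv : v ∈ nums) :
    ∃ r, 1 ≤ r ∧ r ≤ nums.length ∧ pvVal nums r = v := by
  have hv' : v ∈ pvLst nums := (PySem.List.mem_sorted nums (fun x => x) false v).2 hv
  have hlt := List.idxOf_lt_length_of_mem hv'
  refine ⟨(pvLst nums).idxOf v + 1, by omega, by rw [pvLst_length] at hlt; omega, ?_⟩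
  rw [pvVal_getElem nums _ (by omega) (by rw [pvLst_length] at hlt; omega)]
  simp only [Nat.add_sub_cancel]
  exact List.getElem_idxOf hlt

theorem pvIdx_lt (nums : List Int) (v : Int) (hv : v ∈ nums) :
    0 ≤ pvIdx nums v ∧ pvIdx nums v < nums.length := by
  have := List.idxOf_lt_length_of_mem hv
  unfold pvIdx; omega

theorem pvIdx_inj (nums : List Int) (v w : Int) (hv : v ∈ nums) (hw : w ∈ nums)
    (h : pvIdx nums v = pvIdx nums w) : v = w := by
  unfold pvIdx at h
  have hv' := List.idxOf_lt_length_of_mem hv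
  have hw' := List.idxOf_lt_length_of_mem hw
  have : nums.idxOf v = nums.idxOf w := by omega
  calc v = nums[nums.idxOf v] := (List.getElem_idxOf hv').symm
    _ = nums[nums.idxOf w] := by congr 1
    _ = w := List.getElem_idxOf hw'

theorem pvO_zero (nums : List Int) : pvO nums 0 = 0 := rfl

theorem pvO_pos (nums : List Int) (r : Nat) (h1 : 1 ≤ r) (h2 : r ≤ nums.length) :
    0 < pvO nums r ∧ pvO nums r ≤ nums.length := by
  have := pvIdx_lt nums (pvVal nums r) (pvVal_mem nums r h1 h2)
  unfold pvO
  rw [if_neg (show ¬ r = 0 by omega)]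
  omega

theorem pvO_inj (nums : List Int) (hnd : nums.Nodup) (r q : Nat)
    (h2 : r ≤ nums.length) (h4 : q ≤ nums.length) (h : pvO nums r = pvO nums q) : r = q := by
  rcases Nat.eq_zero_or_pos r with hr | hr
  · rcases Nat.eq_zero_or_pos q with hq | hq
    · omega
    · exfalso; subst hr
      rw [pvO_zero] at h
      have := pvO_pos nums q hq h4
      omega
  · rcases Nat.eq_zero_or_pos q with hq | hq
    · exfalso; subst hq
      rw [pvO_zero] at h
      have := pvO_pos nums r hr h2
      omega
    · have hval : pvVal nums r = pvVal nums q := by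
        apply pvIdx_inj nums _ _ (pvVal_mem nums r hr h2) (pvVal_mem nums q hq h4)
        unfold pvO at h
        rw [if_neg (show ¬ r = 0 by omega), if_neg (show ¬ q = 0 by omega)] at h
        omega
      exact pvVal_inj nums hnd r q hr h2 hq h4 hval

def stSf : List Nat → Nat → Int
  | [], _ => 0
  | [_], _ => 0
  | a :: b :: t, y => if y = a then (b : Int) else stSf (b :: t) y

theorem stSf_cons_ne (a : Nat) (l : List Nat) (y : Nat) (h : y ≠ a) :
    stSf (a :: l) y = stSf l y := by
  cases l with
  | nil => rfl
  | cons b t => simp [stSf, h]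

theorem stSf_append_not_mem (P l : List Nat) (y : Nat) (h : y ∉ P) :
    stSf (P ++ l) y = stSf l y := by
  induction P with
  | nil => rfl
  | cons p P' ih =>
      rw [List.cons_append, stSf_cons_ne _ _ _ (by simp at h; exact h.1)]
      exact ih (by simp at h; exact h.2)

theorem stSf_head (a b : Nat) (l : List Nat) : stSf (a :: b :: l) a = (b : Int) := by
  simp [stSf]

theorem pvPairwise_two {R : Nat → Nat → Prop} (l : List Nat) (h : l.Pairwise R) (a b : Nat)
    (ha : a ∈ l) (hb : b ∈ l) (hne : a ≠ b) : R a b ∨ R b a := by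
  rcases List.append_of_mem ha with ⟨s, t, rfl⟩
  rcases List.mem_append.1 hb with hb | hb
  · right
    rcases List.append_of_mem hb with ⟨s1, t1, rfl⟩
    have := List.pairwise_append.1 h
    exact this.2.2 b (by simp) a (by simp)
  · rcases List.mem_cons.1 hb with rfl | hb
    · exact absurd rfl hne
    · left
      have := List.pairwise_append.1 h
      exact (List.pairwise_cons.1 this.2.1).1 b hb

def stInv (nums : List Int) (x : Nat) (st : List Nat) (fa : List Int) : Prop :=
  fa.length = nums.length + 1 ∧
  x ≤ nums.length ∧
  st.head? = some x ∧
  st.getLast? = some 0 ∧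
  (∀ y ∈ st, y ≤ x) ∧
  st.Pairwise (fun a b => b < a ∧ pvO nums b < pvO nums a) ∧
  (∀ z, z ≤ x → z ∉ st → ∃ w ∈ st, z < w ∧ pvO nums w < pvO nums z) ∧
  (∀ y, y ≤ nums.length → pvG fa y 0 =
      if y ∈ st then stSf st y else if 1 ≤ y ∧ y ≤ x then (pvF nums y : Int) else 0)

-- K1: every later position (up to x) has larger occur-time than any stack member
theorem stInv_above (nums : List Int) (x : Nat) (st : List Nat) (fa : List Int)
    (inv : stInv nums x st fa) (a : Nat) (ha : a ∈ st) (z : Nat)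
    (h1 : a < z) (h2 : z ≤ x) : pvO nums a < pvO nums z := by
  obtain ⟨_, hx, _, _, hmem, hpw, hcov, _⟩ := inv
  by_cases hz : z ∈ st
  · rcases pvPairwise_two st hpw a z ha hz (by omega) with h | h
    · omega
    · exact h.2
  · obtain ⟨w, hw, hzw, how⟩ := hcov z h2 hz
    by_cases hwa : w = a
    · subst hwa; exact how
    · rcases pvPairwise_two st hpw a w ha hw (Ne.symm hwa) with h | h
      · omega
      · exact lt_trans h.2 how

-- K2: for an adjacent pair a, s in the stack, s is exactly the nearest smaller-time
-- left neighbour of a (pvL nums a = s)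
theorem stInv_pvL_adj (nums : List Int) (x : Nat) (st : List Nat) (fa : List Int)
    (inv : stInv nums x st fa) (l1 l2 : List Nat) (a s : Nat)
    (hst : st = l1 ++ a :: s :: l2) : pvL nums a = s ∧ pvO nums s < pvO nums a := by
  obtain ⟨_, hx, _, _, hmem, hpw, hcov, _⟩ := inv
  subst hst
  have hpw' := List.pairwise_append.1 hpw
  have hadj := (List.pairwise_cons.1 hpw'.2.1).1 s (by simp)
  have hsa : s < a := hadj.1
  have hosa : pvO nums s < pvO nums a := hadj.2
  have hax : a ≤ x := hmem a (by simp)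
  have hbetween : ∀ z, s < z → z < a → ¬ (pvO nums z < pvO nums a) := by
    intro z hz1 hz2 hcontra
    have hzx : z ≤ x := by omega
    by_cases hzst : z ∈ (l1 ++ a :: s :: l2)
    · rcases List.mem_append.1 hzst with h | h
      · have := hpw'.2.2 z h a (by simp)
        omega
      · rcases List.mem_cons.1 h with rfl | h
        · omega
        · rcases List.mem_cons.1 h with rfl | h
          · omega
          · have := (List.pairwise_cons.1 (List.pairwise_cons.1 hpw'.2.1).2).1 z h
            omega
    · obtain ⟨w, hw, hzw, how⟩ := hcov z hzx hzst
      -- w ∈ st, w > z > s; w cannot be strictly between s and a, so w = a or w ∈ l1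
      have hwcase : w = a ∨ w ∈ l1 := by
        rcases List.mem_append.1 hw with h | h
        · right; exact h
        · rcases List.mem_cons.1 h with rfl | h
          · left; rfl
          · rcases List.mem_cons.1 h with rfl | h
            · omega
            · have := (List.pairwise_cons.1 (List.pairwise_cons.1 hpw'.2.1).2).1 w h
              omega
      rcases hwcase with rfl | h
      · omega
      · have := hpw'.2.2 w h a (by simp)
        omega
  constructor
  · unfold pvL
    rw [Nat.findGreatest_eq_iff]
    refine ⟨by omega, fun _ => hosa, ?_⟩
    intro l hl1 hl2
    exact hbetween l hl1 (by omega)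
  · exact hosa

-- K3a: at the end (x = nums.length) no stack member has a right smaller-time neighbour
theorem stInv_pvR_end (nums : List Int) (st : List Nat) (fa : List Int)
    (inv : stInv nums nums.length st fa) (a : Nat) (ha : a ∈ st) :
    pvR nums a = none := by
  unfold pvR
  rw [List.head?_eq_none_iff, List.filter_eq_nil_iff]
  intro z hz
  have hz' := List.mem_range'_1.1 hz
  have := stInv_above nums nums.length st fa inv a ha z (by omega) (by omega)
  simp only [decide_eq_true_eq]
  omega

-- K3b: while processing x+1 with smaller time than a stack member a, x+1 is exactly a's
-- nearest smaller-time right neighbour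
theorem stInv_pvR_step (nums : List Int) (x : Nat) (st : List Nat) (fa : List Int)
    (inv : stInv nums x st fa) (a : Nat) (ha : a ∈ st) (hx1 : x + 1 ≤ nums.length)
    (hia : pvO nums (x + 1) < pvO nums a) :
    pvR nums a = some (x + 1) := by
  have hax : a ≤ x := inv.2.2.2.2.1 a ha
  unfold pvR
  have hsplit : List.range' (a + 1) (nums.length - a) =
      List.range' (a + 1) (x - a) ++ List.range' (x + 1) (nums.length - x) := by
    rw [show nums.length - a = (x - a) + (nums.length - x) by omega,
        show x + 1 = (a + 1) + 1 * (x - a) by omega]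
    exact List.range'_append.symm
  rw [hsplit, List.filter_append]
  have h1 : (List.range' (a + 1) (x - a)).filter (fun h => decide (pvO nums h < pvO nums a)) = [] := by
    rw [List.filter_eq_nil_iff]
    intro z hz
    have hz' := List.mem_range'_1.1 hz
    have := stInv_above nums x st fa inv a ha z (by omega) (by omega)
    simp only [decide_eq_true_eq]
    omega
  rw [h1, List.nil_append]
  have h2 : List.range' (x + 1) (nums.length - x) = (x + 1) :: List.range' (x + 2) (nums.length - x - 1) := by
    rw [show nums.length - x = (nums.length - x - 1) + 1 by omega, List.range'_succ]
    norm_num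
  rw [h2, List.filter_cons_of_pos (by simp only [decide_eq_true_eq]; omega)]
  rfl

-- K7a: final parent value of a surviving stack member is its lower neighbour in the stack
theorem pvF_end_adj (nums : List Int) (st : List Nat) (fa : List Int)
    (inv : stInv nums nums.length st fa) (l1 l2 : List Nat) (a s : Nat)
    (hst : st = l1 ++ a :: s :: l2) : pvF nums a = s := by
  have hL := stInv_pvL_adj nums nums.length st fa inv l1 l2 a s hst
  have hR := stInv_pvR_end nums st fa inv a (by rw [hst]; simp)
  unfold pvF
  rw [hR, hL.1]

-- K7b/c: parent value of a stack member that is popped when x+1 arrives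
theorem pvF_step_adj (nums : List Int) (x : Nat) (st : List Nat) (fa : List Int)
    (inv : stInv nums x st fa) (l1 l2 : List Nat) (a s : Nat)
    (hst : st = l1 ++ a :: s :: l2) (hx1 : x + 1 ≤ nums.length)
    (hia : pvO nums (x + 1) < pvO nums a) :
    pvF nums a = if pvO nums s < pvO nums (x + 1) then x + 1 else s := by
  have hL := stInv_pvL_adj nums x st fa inv l1 l2 a s hst
  have hR := stInv_pvR_step nums x st fa inv a (by rw [hst]; simp) hx1 hia
  unfold pvF
  rw [hR, hL.1]

-- K4: full description of the popping phase
theorem pvPopLoop_spec (nums : List Int) (oc : List Int)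
    (hocc : ∀ y ≤ nums.length, pvG oc y 0 = pvO nums y)
    (x : Nat) (hx1 : x + 1 ≤ nums.length) :
    ∀ (P : List Nat) (s : Nat) (rest : List Nat) (fa : List Int),
    fa.length = nums.length + 1 →
    (∀ y ∈ P ++ s :: rest, y ≤ x) →
    (P ++ s :: rest).Pairwise (fun a b => b < a ∧ pvO nums b < pvO nums a) →
    (∀ y ∈ P ++ s :: rest, pvG fa y 0 = stSf (P ++ s :: rest) y) →
    (∀ p ∈ P, pvO nums (x + 1) < pvO nums p) →
    pvO nums s < pvO nums (x + 1) →
    ∃ fa', pvPopLoop oc (pvO nums (x + 1)) ((x + 1 : Nat) : Int) fa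
        ((P ++ s :: rest).map (Nat.cast : Nat → Int))
      = (fa', (s :: rest).map (Nat.cast : Nat → Int)) ∧
      fa'.length = nums.length + 1 ∧
      (∀ y, y ≤ nums.length →
        pvG fa' y 0 = if some y = P.getLast? then ((x + 1 : Nat) : Int) else pvG fa y 0) := by
  intro P
  induction P with
  | nil =>
      intro s rest fa hlen hmem hpw hfa hP hs
      refine ⟨fa, ?_, hlen, ?_⟩
      · simp only [List.nil_append, List.map_cons]
        have hos : pvG oc s 0 = pvO nums s := hocc s (by have := hmem s (by simp); omega)
        have hcond : ¬ (pvO nums (x + 1) < PySem.List.pyGetD oc (↑s) 0) := by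
          unfold pvG at hos; rw [hos]; omega
        rw [pvPopLoop_cons, if_neg hcond]
      · intro y _; simp
  | cons a P' ih =>
      intro s rest fa hlen hmem hpw hfa hP hs
      have hax : a ≤ x := hmem a (by simp)
      have ha_len : a < fa.length := by omega
      have hnotmem : a ∉ P' ++ s :: rest := by
        intro hmem2
        have := (List.pairwise_cons.1 hpw).1 a hmem2
        omega
      simp only [List.cons_append, List.map_cons]
      have hoa : pvG oc a 0 = pvO nums a := hocc a (by omega)
      have hconda : pvO nums (x + 1) < PySem.List.pyGetD oc (↑a) 0 := by
        unfold pvG at hoa; rw [hoa]; exact hP a (by simp)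
      rw [pvPopLoop_cons, if_pos hconda]
      -- fa[a] = head of (P' ++ s :: rest)
      have hfa_a : pvG fa a 0 = stSf (a :: (P' ++ s :: rest)) a := hfa a (by simp)
      cases P' with
      | nil =>
          have hb : PySem.List.pyGetD fa (↑a) 0 = ((s : Nat) : Int) := by
            have h := hfa_a
            unfold pvG at h
            rw [h]
            simp only [List.nil_append]
            exact stSf_head a s rest
          have hos : pvG oc s 0 = pvO nums s := hocc s (by have := hmem s (by simp); omega)
          have hcond : PySem.List.pyGetD oc (PySem.List.pyGetD fa (↑a) 0) 0 < pvO nums (x + 1) := by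
            rw [hb]
            unfold pvG at hos
            rw [hos]
            exact hs
          rw [if_pos hcond]
          obtain ⟨fa', heq, hlen', hvals⟩ := ih s rest (pvSetItem fa (↑a) ((x + 1 : Nat) : Int))
            (by rw [pvSetItem_length]; exact hlen)
            (fun y hy => hmem y (by simp at hy ⊢; tauto))
            ((List.pairwise_cons.1 hpw).2)
            (fun y hy => by
              have hyne : y ≠ a := by rintro rfl; exact hnotmem hy
              show pvG (pvSetItem fa (↑a) _) y 0 = _
              rw [pvG_pvSetItem fa a y _ 0 ha_len, if_neg (Ne.symm hyne)]
              refine (hfa y (by simp at hy ⊢; tauto)).trans ?_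
              simp only [List.singleton_append, List.nil_append]
              rw [stSf_cons_ne _ _ _ hyne])
            (by intro p hp; simp at hp) hs
          refine ⟨fa', heq, hlen', ?_⟩
          intro y hy
          rw [hvals y hy]
          simp only [List.getLast?_nil, List.getLast?_singleton]
          by_cases hya : y = a
          · subst hya
            rw [if_neg (by simp), if_pos rfl]
            rw [pvG_pvSetItem fa y y _ 0 ha_len, if_pos rfl]
          · rw [if_neg (by simp), if_neg (by simpa using hya)]
            rw [pvG_pvSetItem fa a y _ 0 ha_len, if_neg (fun h => hya h.symm)]
      | cons a2 P2 =>
          have hb : PySem.List.pyGetD fa (↑a) 0 = ((a2 : Nat) : Int) := by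
            have h := hfa_a
            unfold pvG at h
            rw [h]
            simp only [List.cons_append]
            exact stSf_head a a2 (P2 ++ s :: rest)
          have ha2x : a2 ≤ x := hmem a2 (by simp)
          have hoa2 : pvG oc a2 0 = pvO nums a2 := hocc a2 (by omega)
          have hcond : ¬ (PySem.List.pyGetD oc (PySem.List.pyGetD fa (↑a) 0) 0 < pvO nums (x + 1)) := by
            rw [hb]
            unfold pvG at hoa2
            rw [hoa2]
            have := hP a2 (by simp)
            omega
          rw [if_neg hcond]
          obtain ⟨fa', heq, hlen', hvals⟩ := ih s rest fa hlen
            (fun y hy => hmem y (by simp at hy ⊢; tauto))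
            ((List.pairwise_cons.1 hpw).2)
            (fun y hy => by
              have hyne : y ≠ a := by rintro rfl; exact hnotmem hy
              refine (hfa y (by simp at hy ⊢; tauto)).trans ?_
              simp only [List.cons_append]
              rw [stSf_cons_ne _ _ _ hyne])
            (fun p hp => hP p (by simp at hp ⊢; tauto)) hs
          refine ⟨fa', heq, hlen', ?_⟩
          intro y hy
          rw [hvals y hy]
          rw [List.getLast?_cons_cons]

theorem pvStack_split (nums : List Int) (i : Int) (st : List Nat)
    (hlast : st.getLast? = some 0) (h0 : pvO nums 0 < i)
    (hne : ∀ y ∈ st, pvO nums y ≠ i) :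
    ∃ P s rest, st = P ++ s :: rest ∧ (∀ p ∈ P, i < pvO nums p) ∧ pvO nums s < i := by
  induction st with
  | nil => simp at hlast
  | cons a t ih =>
      by_cases ha : pvO nums a < i
      · exact ⟨[], a, t, by simp, by simp, ha⟩
      · cases t with
        | nil =>
            simp at hlast
            subst hlast
            rw [pvO_zero] at ha
            rw [pvO_zero] at h0
            omega
        | cons b t' =>
            obtain ⟨P, s, rest, heq, hP, hs⟩ := ih (by rwa [List.getLast?_cons_cons] at hlast)
              (fun y hy => hne y (List.mem_cons_of_mem _ hy))
            refine ⟨a :: P, s, rest, by rw [List.cons_append, heq], ?_, hs⟩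
            intro p hp
            rcases List.mem_cons.1 hp with rfl | hp
            · have := hne p (by simp)
              omega
            · exact hP p hp

theorem pvSplit_at_mem_ne_last (P : List Nat) (y : Nat) (hy : y ∈ P) (hP : P ≠ [])
    (hne : y ≠ P.getLast hP) : ∃ l1 y2 l2, P = l1 ++ y :: y2 :: l2 := by
  induction P with
  | nil => simp at hy
  | cons a t ih =>
      cases t with
      | nil =>
          simp at hy
          subst hy
          simp [List.getLast] at hne
      | cons b t' =>
          rcases List.mem_cons.1 hy with rfl | hy'
          · exact ⟨[], b, t', by simp⟩
          · obtain ⟨l1, y2, l2, heq⟩ := ih hy' (by simp)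
              (by rwa [List.getLast_cons_cons] at hne)
            exact ⟨a :: l1, y2, l2, by rw [heq]; simp⟩

-- K5: one iteration of the main loop preserves the invariant
theorem stInv_step (nums : List Int) (hnd : nums.Nodup) (oc : List Int)
    (hocc : ∀ y ≤ nums.length, pvG oc y 0 = pvO nums y)
    (x : Nat) (st : List Nat) (fa : List Int) (inv : stInv nums x st fa)
    (hx1 : x + 1 ≤ nums.length) :
    ∃ st2 fa2,
      stStep oc (fa, st.map (Nat.cast : Nat → Int)) (((x + 1 : Nat) : Int), pvO nums (x + 1))
        = (fa2, st2.map (Nat.cast : Nat → Int)) ∧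
      stInv nums (x + 1) st2 fa2 := by
  have hinv := inv
  obtain ⟨hlen, hx, hhead, hlast, hmem, hpw, hcov, hfav⟩ := hinv
  have hi_pos := pvO_pos nums (x + 1) (by omega) hx1
  -- split the stack at the first member with smaller time
  obtain ⟨P, s, rest, hsplit, hP, hs⟩ := pvStack_split nums (pvO nums (x + 1)) st hlast
    (by rw [pvO_zero]; omega)
    (by
      intro y hy h
      have hyx : y ≤ x := hmem y hy
      have := pvO_inj nums hnd y (x + 1) (by omega) hx1 h
      omega)
  have hstnd : st.Nodup := hpw.imp (fun hab => by omega)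
  have hdisj := List.disjoint_of_nodup_append (by rw [← hsplit]; exact hstnd)
  -- run the popping phase
  obtain ⟨fa', heq, hlen', hvals⟩ := pvPopLoop_spec nums oc hocc x hx1 P s rest fa hlen
    (by rw [← hsplit]; exact hmem)
    (by rw [← hsplit]; exact hpw)
    (by
      intro y hy
      rw [← hsplit] at hy ⊢
      rw [hfav y (by have := hmem y hy; omega), if_pos hy])
    hP hs
  refine ⟨(x + 1) :: s :: rest, pvSetItem fa' ((x + 1 : Nat) : Int) ((s : Nat) : Int), ?_, ?_⟩
  · show stStep oc _ _ = _
    unfold stStep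
    simp only []
    rw [hsplit]
    simp only [heq]
    rfl
  -- re-establish the invariant
  have hsx : s ≤ x := hmem s (by rw [hsplit]; simp)
  have hrestmem : ∀ y ∈ s :: rest, y ≤ x := by
    intro y hy; exact hmem y (by rw [hsplit]; simp [hy])
  have hpwsuf : (s :: rest).Pairwise (fun a b => b < a ∧ pvO nums b < pvO nums a) := by
    have : (s :: rest).Sublist st := by rw [hsplit]; exact List.sublist_append_right _ _
    exact hpw.sublist this
  have hx1len : x + 1 < fa'.length := by omega
  refine ⟨by rw [pvSetItem_length]; omega, hx1, rfl, ?_, ?_, ?_, ?_, ?_⟩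
  · -- getLast
    show ((x + 1) :: s :: rest).getLast? = some 0
    rw [List.getLast?_cons_cons]
    have : (s :: rest).getLast? = some 0 := by
      rw [hsplit] at hlast
      rwa [List.getLast?_append_of_ne_nil _ (by simp)] at hlast
    exact this
  · -- membership bound
    intro y hy
    rcases List.mem_cons.1 hy with rfl | hy
    · omega
    · have := hrestmem y hy; omega
  · -- pairwise
    refine List.pairwise_cons.2 ⟨?_, hpwsuf⟩
    intro y hy
    rcases List.mem_cons.1 hy with rfl | hy'
    · exact ⟨by omega, hs⟩
    · have hrel := (List.pairwise_cons.1 hpwsuf).1 y hy'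
      exact ⟨by have := hrestmem y hy; omega, lt_trans hrel.2 hs⟩
  · -- cover
    intro z hz hznot
    have hzne : z ≠ x + 1 := by intro h; exact hznot (h ▸ List.mem_cons_self)
    have hz' : z ≤ x := by omega
    have hznotsr : z ∉ s :: rest := fun h => hznot (List.mem_cons_of_mem _ h)
    by_cases hzst : z ∈ st
    · have hzP : z ∈ P := by
        rw [hsplit] at hzst
        rcases List.mem_append.1 hzst with h | h
        · exact h
        · exact absurd h hznotsr
      exact ⟨x + 1, List.mem_cons_self, by omega, hP z hzP⟩
    · obtain ⟨w, hw, hzw, how⟩ := hcov z hz' hzst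
      rw [hsplit] at hw
      rcases List.mem_append.1 hw with hwP | hwsr
      · exact ⟨x + 1, List.mem_cons_self, by omega, lt_trans (hP w hwP) how⟩
      · exact ⟨w, List.mem_cons_of_mem _ hwsr, hzw, how⟩
  · -- father values
    intro y hy
    show pvG (pvSetItem fa' _ _) y 0 = _
    rw [pvG_pvSetItem fa' (x + 1) y _ 0 hx1len]
    by_cases hyx1 : x + 1 = y
    · rw [if_pos hyx1, ← hyx1, if_pos List.mem_cons_self, stSf_head]
    · rw [if_neg hyx1, hvals y hy]
      have hynew_ne : y ∉ ((x + 1) :: s :: rest) ↔ y ∉ s :: rest := by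
        constructor
        · intro h hmem2; exact h (List.mem_cons_of_mem _ hmem2)
        · intro h hmem2
          rcases List.mem_cons.1 hmem2 with h2 | h2
          · exact hyx1 h2.symm
          · exact h h2
      by_cases hyP : some y = P.getLast?
      · -- the bottom-most popped element: its parent is now x+1
        have hPne : P ≠ [] := by rintro rfl; simp at hyP
        have hygl : y = P.getLast hPne := by
          rw [List.getLast?_eq_some_getLast hPne] at hyP
          exact Option.some.inj hyP
        have hyP' : y ∈ P := hygl ▸ List.getLast_mem hPne
        have hynotsr : y ∉ s :: rest := fun h => hdisj hyP' h
        have hys : s < y := by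
          have := List.pairwise_append.1 (hsplit ▸ hpw)
          exact (this.2.2 y hyP' s (by simp)).1
        have hyx : y ≤ x := hmem y (by rw [hsplit]; exact List.mem_append_left _ hyP')
        have hadj : st = P.dropLast ++ y :: s :: rest := by
          rw [hsplit]
          conv_lhs => rw [← List.dropLast_concat_getLast hPne]
          rw [← hygl]
          simp
        have hyF : pvF nums y = x + 1 := by
          rw [pvF_step_adj nums x st fa inv P.dropLast rest y s hadj hx1 (hP y hyP'), if_pos hs]
        rw [if_pos hyP, if_neg (hynew_ne.2 hynotsr), if_pos ⟨by omega, by omega⟩, hyF]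
      · rw [if_neg hyP]
        by_cases hysr : y ∈ s :: rest
        · have hynotP : y ∉ P := fun h => hdisj h hysr
          rw [hfav y hy, if_pos (by rw [hsplit]; exact List.mem_append_right _ hysr)]
          rw [if_pos (List.mem_cons_of_mem _ hysr), hsplit]
          rw [stSf_append_not_mem _ _ _ hynotP, stSf_cons_ne _ _ _ (fun h => hyx1 h.symm)]
        · by_cases hyst : y ∈ st
          · -- a popped element that is not the bottom: parent unchanged
            have hyP' : y ∈ P := by
              rw [hsplit] at hyst
              rcases List.mem_append.1 hyst with h | h
              · exact h
              · exact absurd h hysr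
            have hPne : P ≠ [] := by rintro rfl; simp at hyP'
            have hygl : y ≠ P.getLast hPne := by
              intro h
              exact hyP (by rw [List.getLast?_eq_some_getLast hPne, h])
            obtain ⟨l1, y2, l2, hPsplit⟩ := pvSplit_at_mem_ne_last P y hyP' hPne hygl
            have hstsplit : st = l1 ++ y :: y2 :: (l2 ++ s :: rest) := by
              rw [hsplit, hPsplit]
              simp
            have hynotl1 : y ∉ l1 := by
              have hnd2 := hstnd
              rw [hstsplit] at hnd2
              intro h
              exact (List.disjoint_of_nodup_append hnd2) h (by simp)
            have hy2P : y2 ∈ P := by rw [hPsplit]; simp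
            have hys2 : stSf st y = (y2 : Int) := by
              rw [hstsplit, stSf_append_not_mem _ _ _ hynotl1, stSf_head]
            have hyF : pvF nums y = y2 := by
              rw [pvF_step_adj nums x st fa inv l1 (l2 ++ s :: rest) y y2 hstsplit hx1
                (hP y hyP')]
              rw [if_neg (by have := hP y2 hy2P; omega)]
            have hy1 : 1 ≤ y := by
              have := List.pairwise_append.1 (hsplit ▸ hpw)
              have := (this.2.2 y hyP' s (by simp)).1
              omega
            have hyx : y ≤ x := hmem y hyst
            rw [hfav y hy, if_pos hyst, if_neg (hynew_ne.2 hysr), if_pos ⟨hy1, by omega⟩,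
              hys2, hyF]
          · -- untouched element
            rw [hfav y hy, if_neg hyst, if_neg (hynew_ne.2 hysr)]
            by_cases hyr : 1 ≤ y ∧ y ≤ x
            · rw [if_pos hyr, if_pos ⟨hyr.1, by omega⟩]
            · rw [if_neg hyr, if_neg (by
                intro h
                rcases h with ⟨h1, h2⟩
                have : y = x + 1 := by
                  by_contra h3
                  exact hyr ⟨h1, by omega⟩
                exact hyx1 this.symm)]

-- K6a: the enumerate-fold is a fold over 0..n with exact occur times
theorem pvFold_translate (nums oc : List Int) (init : List Int × List Int)
    (hocc : ∀ y ≤ nums.length, pvG oc y 0 = pvO nums y)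
    (hoclen : oc.length = nums.length + 1) :
    (PySem.List.enumerate oc).foldl (stStep oc) init
      = (List.range (nums.length + 1)).foldl
          (fun fs k => stStep oc fs (((k : Nat) : Int), pvO nums k)) init := by
  rw [PySem.List.enumerate_eq_map_pyRange oc 0, List.foldl_map]
  have hlen : PySem.List.len oc = ((nums.length + 1 : Nat) : Int) := by
    simp [PySem.List.len_eq, hoclen]
  rw [hlen, PySem.List.pyRange_one, List.foldl_map]
  simp only [Int.sub_zero, Int.toNat_natCast, zero_add]
  apply PySem.List.foldl_congr_mem
  intro acc k hk
  have hk' : k ≤ nums.length := by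
    have := List.mem_range.1 hk
    omega
  have := hocc k hk'
  unfold pvG at this
  rw [this]

-- K6b: the invariant holds after each prefix of the main loop
theorem pvFold_inv (nums : List Int) (hnd : nums.Nodup) (oc : List Int)
    (hocc : ∀ y ≤ nums.length, pvG oc y 0 = pvO nums y) :
    ∀ k, k ≤ nums.length →
    ∃ st fa, (List.range (k + 1)).foldl
        (fun fs j => stStep oc fs (((j : Nat) : Int), pvO nums j))
        (List.replicate (nums.length + 1) (0 : Int), [])
      = (fa, st.map (Nat.cast : Nat → Int)) ∧ stInv nums k st fa := by
  intro k
  induction k with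
  | zero =>
      intro _
      refine ⟨[0], List.replicate (nums.length + 1) (0 : Int), ?_, ?_⟩
      · rfl
      · refine ⟨by simp, by omega, rfl, rfl, by simp, by simp, ?_, ?_⟩
        · intro z hz hznot
          interval_cases z
          simp at hznot
        · intro y hy
          rw [pvG_replicate _ _ _ _ (by omega)]
          by_cases h : y ∈ [0]
          · simp at h
            subst h
            rw [if_pos (by simp)]
            rfl
          · rw [if_neg h, if_neg (by simp at h; omega)]
  | succ k ih =>
      intro hk1
      obtain ⟨st, fa, heq, inv⟩ := ih (by omega)
      obtain ⟨st2, fa2, hstep, inv2⟩ := stInv_step nums hnd oc hocc k st fa inv hk1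
      refine ⟨st2, fa2, ?_, inv2⟩
      rw [List.range_succ, List.foldl_append, heq]
      simpa using hstep

-- K6c: the father array at the end of the main loop gives exactly pvF
theorem pvStack_father (nums : List Int) (hnd : nums.Nodup) (oc : List Int)
    (hocc : ∀ y ≤ nums.length, pvG oc y 0 = pvO nums y)
    (hoclen : oc.length = nums.length + 1) (r : Nat) (hr1 : 1 ≤ r) (hr2 : r ≤ nums.length) :
    pvG ((PySem.List.enumerate oc).foldl (stStep oc)
        (List.replicate (nums.length + 1) (0 : Int), [])).1 r 0 = (pvF nums r : Int) := by
  rw [pvFold_translate nums oc _ hocc hoclen]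
  obtain ⟨st, fa, heq, inv⟩ := pvFold_inv nums hnd oc hocc nums.length le_rfl
  rw [heq]
  obtain ⟨hlen, hx, hhead, hlast, hmem, hpw, hcov, hfav⟩ := inv
  rw [hfav r hr2]
  by_cases hrst : r ∈ st
  · rw [if_pos hrst]
    have hstne : st ≠ [] := by rintro rfl; simp at hrst
    have hrgl : r ≠ st.getLast hstne := by
      intro h
      have : st.getLast? = some (st.getLast hstne) := List.getLast?_eq_some_getLast hstne
      rw [hlast] at this
      have := Option.some.inj this
      omega
    obtain ⟨l1, y2, l2, hsplit⟩ := pvSplit_at_mem_ne_last st r hrst hstne hrgl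
    have hstnd : st.Nodup := hpw.imp (fun hab => by omega)
    have hrnotl1 : r ∉ l1 := by
      have hnd2 := hstnd
      rw [hsplit] at hnd2
      intro h
      exact (List.disjoint_of_nodup_append hnd2) h (by simp)
    rw [hsplit, stSf_append_not_mem _ _ _ hrnotl1, stSf_head]
    have := pvF_end_adj nums st fa ⟨hlen, hx, hhead, hlast, hmem, hpw, hcov, hfav⟩ l1 l2 r y2 hsplit
    rw [this]
  · rw [if_neg hrst, if_pos ⟨hr1, hr2⟩]

theorem pvSetFold_length (ps : List (Int × Int)) (oc0 : List Int) :
    (ps.foldl (fun oc p => pvSetItem oc p.2 p.1) oc0).length = oc0.length := by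
  induction ps generalizing oc0 with
  | nil => rfl
  | cons p t ih => rw [List.foldl_cons, ih, pvSetItem_length]

theorem pvSetFold_getD_notmem (ps : List (Int × Int)) (oc0 : List Int) (k : Nat)
    (hpos : ∀ p ∈ ps, 0 ≤ p.2) (h : ∀ p ∈ ps, p.2 ≠ (k : Int)) :
    pvG (ps.foldl (fun oc p => pvSetItem oc p.2 p.1) oc0) k 0 = pvG oc0 k 0 := by
  induction ps generalizing oc0 with
  | nil => rfl
  | cons p t ih =>
      rw [List.foldl_cons, ih _ (fun q hq => hpos q (List.mem_cons_of_mem _ hq))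
        (fun q hq => h q (List.mem_cons_of_mem _ hq))]
      unfold pvG pvSetItem
      cases hidx : PySem.List.pyIdx? oc0.length p.2 with
      | none => rfl
      | some j =>
          have hjk : j ≠ k := by
            intro hj
            subst hj
            unfold PySem.List.pyIdx? at hidx
            rw [if_pos (hpos p (by simp))] at hidx
            split_ifs at hidx with h2
            · have := Option.some.inj hidx
              have := h p (by simp)
              have := hpos p (by simp)
              omega
          simp only [PySem.List.pyGetD_natCast, List.getD, List.getElem?_set]
          rw [if_neg hjk]

theorem pvSetFold_getD_mem (ps : List (Int × Int)) (oc0 : List Int) (k : Nat) (i : Int)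
    (hpos : ∀ p ∈ ps, 0 ≤ p.2) (hnd : (ps.map (·.2)).Nodup) (hmem : (i, (k : Int)) ∈ ps)
    (hk : k < oc0.length) :
    pvG (ps.foldl (fun oc p => pvSetItem oc p.2 p.1) oc0) k 0 = i := by
  induction ps generalizing oc0 with
  | nil => simp at hmem
  | cons p t ih =>
      rcases List.mem_cons.1 hmem with rfl | hmem'
      · rw [List.foldl_cons]
        rw [pvSetFold_getD_notmem t _ k (fun q hq => hpos q (List.mem_cons_of_mem _ hq)) (by
          intro q hq hq2
          simp only [List.map_cons] at hnd
          exact (List.nodup_cons.1 hnd).1 (hq2 ▸ List.mem_map_of_mem hq))]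
        rw [pvG_pvSetItem oc0 k k i 0 hk, if_pos rfl]
      · rw [List.foldl_cons]
        have hp2 : p.2 ≠ (k : Int) := by
          intro h
          simp only [List.map_cons] at hnd
          exact (List.nodup_cons.1 hnd).1 (h ▸ List.mem_map_of_mem hmem')
        exact ih (pvSetItem oc0 p.2 p.1)
          (fun q hq => hpos q (List.mem_cons_of_mem _ hq))
          (by simp only [List.map_cons] at hnd; exact (List.nodup_cons.1 hnd).2)
          hmem' (by rw [pvSetItem_length]; exact hk)

def pvRnk (nums : List Int) (v : Int) : Int := ((pvLst nums).idxOf v : Int) + 1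

theorem pvRnk_val (nums : List Int) (hnd : nums.Nodup) (y : Nat) (h1 : 1 ≤ y) (h2 : y ≤ nums.length) :
    pvRnk nums (pvVal nums y) = (y : Int) := by
  unfold pvRnk
  rw [pvVal_getElem nums y h1 h2, List.Nodup.idxOf_getElem (pvLst_nodup nums hnd) _ _]
  omega

theorem pvOrder_nodup (nums : List Int) (hnd : nums.Nodup) :
    (nums.map (pvRnk nums)).Nodup := by
  apply List.Nodup.map_on _ hnd
  intro v hv w hw h
  unfold pvRnk at h
  have hv' : v ∈ pvLst nums := (PySem.List.mem_sorted nums (fun x => x) false v).2 hv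
  have hw' : w ∈ pvLst nums := (PySem.List.mem_sorted nums (fun x => x) false w).2 hw
  have h1 := List.idxOf_lt_length_of_mem hv'
  have h2 := List.idxOf_lt_length_of_mem hw'
  have heq : (pvLst nums).idxOf v = (pvLst nums).idxOf w := by omega
  calc v = (pvLst nums)[(pvLst nums).idxOf v] := (List.getElem_idxOf h1).symm
    _ = (pvLst nums)[(pvLst nums).idxOf w] := by congr 1
    _ = w := List.getElem_idxOf h2

theorem pvOccur_len (nums : List Int) (order : List Int) :
    ((PySem.List.enumerate order 1).foldl (fun oc p => pvSetItem oc p.2 p.1)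
      (List.replicate (nums.length + 1) (0 : Int))).length = nums.length + 1 := by
  rw [pvSetFold_length]
  simp

theorem pvOccur_val (nums : List Int) (hnd : nums.Nodup) (y : Nat) (hy : y ≤ nums.length) :
    pvG ((PySem.List.enumerate (nums.map (pvRnk nums)) 1).foldl
        (fun oc p => pvSetItem oc p.2 p.1)
        (List.replicate (nums.length + 1) (0 : Int))) y 0 = pvO nums y := by
  have hpos : ∀ p ∈ PySem.List.enumerate (nums.map (pvRnk nums)) 1, 0 ≤ p.2 := by
    intro p hp
    obtain ⟨k, hk, rfl⟩ := (PySem.List.mem_enumerate_iff _ _ _).1 hp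
    simp only [List.getElem_map]
    unfold pvRnk
    omega
  by_cases hy0 : y = 0
  · subst hy0
    rw [pvSetFold_getD_notmem _ _ _ hpos (by
      intro p hp h
      obtain ⟨k, hk, rfl⟩ := (PySem.List.mem_enumerate_iff _ _ _).1 hp
      simp only [List.getElem_map] at h
      unfold pvRnk at h
      simp at h
      omega)]
    rw [pvG_replicate _ _ _ _ (by omega), pvO_zero]
  · have hy1 : 1 ≤ y := by omega
    have hvmem := pvVal_mem nums y hy1 hy
    have hk : nums.idxOf (pvVal nums y) < nums.length := List.idxOf_lt_length_of_mem hvmem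
    rw [pvSetFold_getD_mem _ _ y (pvO nums y) hpos
      (by rw [PySem.List.map_snd_enumerate]; exact pvOrder_nodup nums hnd)
      ?_ (by simp; omega)]
    rw [PySem.List.mem_enumerate_iff]
    refine ⟨nums.idxOf (pvVal nums y), by simpa using hk, ?_⟩
    simp only [List.getElem_map]
    rw [List.getElem_idxOf hk, pvRnk_val nums hnd y hy1 hy]
    unfold pvO pvIdx
    rw [if_neg hy0]
    simp [add_comm]

theorem pvR_bounds (nums : List Int) (r h : Nat) (hR : pvR nums r = some h) :
    r < h ∧ h ≤ nums.length := by
  unfold pvR at hR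
  have hmem : h ∈ (List.range' (r + 1) (nums.length - r)).filter
      (fun h => decide (pvO nums h < pvO nums r)) := List.mem_of_mem_head? (by rw [hR]; simp)
  have := List.mem_range'_1.1 (List.mem_of_mem_filter hmem)
  omega

theorem pvF_bounds (nums : List Int) (r : Nat) (h1 : 1 ≤ r) (h2 : r ≤ nums.length) :
    pvF nums r ≤ nums.length := by
  have hL : pvL nums r ≤ r - 1 := Nat.findGreatest_le _
  cases hR : pvR nums r with
  | none =>
      unfold pvF
      rw [hR]
      show pvL nums r ≤ nums.length
      omega
  | some h =>
      have := pvR_bounds nums r h hR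
      unfold pvF
      rw [hR]
      show (if pvO nums (pvL nums r) < pvO nums h then h else pvL nums r) ≤ nums.length
      split_ifs <;> omega

def pvAssemble (nums : List Int) : List (List Int) :=
  (List.range nums.length).foldl (fun adj k =>
    if ((pvF nums (k + 1) : Nat) : Int) ≠ 0 then
      pvSetItem adj (pvIdx nums (pvVal nums (pvF nums (k + 1))))
        (PySem.List.pyGetD adj (pvIdx nums (pvVal nums (pvF nums (k + 1)))) [] ++
          [pvIdx nums (pvVal nums (k + 1))])
    else adj)
    (List.replicate nums.length ([] : List Int))

theorem pvInd_getD (nums : List Int) (hnd : nums.Nodup) (v : Int) (hv : v ∈ nums) :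
    ((PySem.List.enumerate nums).foldl (fun d p => d.insert p.2 p.1) PySem.Dict.empty).getD v 0
      = pvIdx nums v := by
  have := pvDictFold_getD (fun i => i) nums 0 PySem.Dict.empty v hnd hv
  simpa [pvIdx] using this

theorem pvDct_getD (nums : List Int) (hnd : nums.Nodup) (v : Int) (hv : v ∈ nums) :
    ((PySem.List.enumerate (PySem.List.sorted nums (fun x => x))).foldl
        (fun d p => d.insert p.2 (p.1 + 1)) PySem.Dict.empty).getD v 0 = pvRnk nums v := by
  have := pvDictFold_getD (fun i => i + 1) (PySem.List.sorted nums (fun x => x)) 0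
    PySem.Dict.empty v (pvLst_nodup nums hnd)
    ((PySem.List.mem_sorted nums (fun x => x) false v).2 hv)
  simpa [pvRnk, pvLst] using this

theorem pvBuildA_eq (nums : List Int) (hnd : nums.Nodup) :
    build_with_stack nums = pvAssemble nums := by
  simp only [build_with_stack, Int.toNat_natCast]
  rw [List.map_congr_left (fun v hv => pvDct_getD nums hnd v hv)]
  rw [PySem.List.pyRange_one]
  rw [show ((nums.length : Int) + 1 - 1).toNat = nums.length by omega]
  rw [List.foldl_map]
  unfold pvAssemble
  apply PySem.List.foldl_congr_mem
  intro acc k hk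
  have hk' : k < nums.length := List.mem_range.1 hk
  have hcast : (1 + (k : Int)) = (((k + 1 : Nat)) : Int) := by push_cast; ring
  rw [hcast]
  have hocc := fun (y : Nat) (hy : y ≤ nums.length) => pvOccur_val nums hnd y hy
  have hoclen := pvOccur_len nums (nums.map (pvRnk nums))
  have hfather := pvStack_father nums hnd _ hocc hoclen (k + 1) (by omega) (by omega)
  unfold pvG at hfather
  rw [hfather]
  by_cases hF : pvF nums (k + 1) = 0
  · simp [hF]
  · have hcond : (((pvF nums (k + 1) : Nat)) : Int) ≠ 0 := by simpa using hF
    rw [if_pos hcond, if_pos hcond]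
    have hF1 : 1 ≤ pvF nums (k + 1) := by omega
    have hFn : pvF nums (k + 1) ≤ nums.length := pvF_bounds nums (k + 1) (by omega) (by omega)
    rw [show ((pvF nums (k + 1) : Nat) : Int) - 1 = ((pvF nums (k + 1) - 1 : Nat) : Int) by omega]
    rw [show (((k + 1 : Nat) : Int)) - 1 = ((k : Nat) : Int) by omega]
    have h1 : PySem.List.pyGetD (PySem.List.sorted nums (fun x => x)) ((pvF nums (k + 1) - 1 : Nat) : Int) 0
        = pvVal nums (pvF nums (k + 1)) := rfl
    have h2 : PySem.List.pyGetD (PySem.List.sorted nums (fun x => x)) ((k : Nat) : Int) 0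
        = pvVal nums (k + 1) := rfl
    rw [h1, h2]
    rw [pvInd_getD nums hnd _ (pvVal_mem nums _ hF1 hFn),
      pvInd_getD nums hnd _ (pvVal_mem nums (k + 1) (by omega) (by omega))]

theorem pvFoldMax (M : Int) (f : Option Int → Int → Option Int)
    (hfn : ∀ x, f none x = some x)
    (hfs : ∀ m x, f (some m) x = if m < x then some x else some m) :
    ∀ (xs : List Int) (acc : Option Int),
    (∀ y ∈ xs, y ≤ M) → (M ∈ xs ∨ acc = some M) → (∀ a, acc = some a → a ≤ M) →
    xs.foldl f acc = some M := by
  intro xs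
  induction xs with
  | nil =>
      intro acc _ hM _
      rcases hM with h | h
      · simp at h
      · simpa using h
  | cons x t ih =>
      intro acc hle hM hbound
      rw [List.foldl_cons]
      have hxM : x ≤ M := hle x (by simp)
      cases acc with
      | none =>
          rw [hfn]
          apply ih (some x) (fun y hy => hle y (by simp [hy]))
          · rcases hM with h | h
            · rcases List.mem_cons.1 h with rfl | h
              · right; rfl
              · left; exact h
            · simp at h
          · intro a ha
            exact (Option.some.inj ha) ▸ hxM
      | some m =>
          rw [hfs]
          have hmM : m ≤ M := hbound m rfl
          by_cases hmx : m < x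
          · rw [if_pos hmx]
            apply ih (some x) (fun y hy => hle y (by simp [hy]))
            · rcases hM with h | h
              · rcases List.mem_cons.1 h with rfl | h
                · right; rfl
                · left; exact h
              · right
                have := Option.some.inj h
                omega
            · intro a ha
              exact (Option.some.inj ha) ▸ hxM
          · rw [if_neg hmx]
            apply ih (some m) (fun y hy => hle y (by simp [hy]))
            · rcases hM with h | h
              · rcases List.mem_cons.1 h with rfl | h
                · right
                  congr 1
                  omega
                · left; exact h
              · right; exact h
            · intro a ha
              exact (Option.some.inj ha) ▸ hmM

theorem pvFoldMin (M : Int) (f : Option Int → Int → Option Int)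
    (hfn : ∀ x, f none x = some x)
    (hfs : ∀ m x, f (some m) x = if x < m then some x else some m) :
    ∀ (xs : List Int) (acc : Option Int),
    (∀ y ∈ xs, M ≤ y) → (M ∈ xs ∨ acc = some M) → (∀ a, acc = some a → M ≤ a) →
    xs.foldl f acc = some M := by
  intro xs
  induction xs with
  | nil =>
      intro acc _ hM _
      rcases hM with h | h
      · simp at h
      · simpa using h
  | cons x t ih =>
      intro acc hle hM hbound
      rw [List.foldl_cons]
      have hxM : M ≤ x := hle x (by simp)
      cases acc with
      | none =>
          rw [hfn]
          apply ih (some x) (fun y hy => hle y (by simp [hy]))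
          · rcases hM with h | h
            · rcases List.mem_cons.1 h with rfl | h
              · right; rfl
              · left; exact h
            · simp at h
          · intro a ha
            exact (Option.some.inj ha) ▸ hxM
      | some m =>
          rw [hfs]
          have hmM : M ≤ m := hbound m rfl
          by_cases hmx : x < m
          · rw [if_pos hmx]
            apply ih (some x) (fun y hy => hle y (by simp [hy]))
            · rcases hM with h | h
              · rcases List.mem_cons.1 h with rfl | h
                · right; rfl
                · left; exact h
              · right
                have := Option.some.inj h
                omega
            · intro a ha
              exact (Option.some.inj ha) ▸ hxM
          · rw [if_neg hmx]
            apply ih (some m) (fun y hy => hle y (by simp [hy]))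
            · rcases hM with h | h
              · rcases List.mem_cons.1 h with rfl | h
                · right
                  congr 1
                  omega
                · left; exact h
              · right; exact h
            · intro a ha
              exact (Option.some.inj ha) ▸ hmM

theorem pvMax_eq (xs : List Int) (M : Int) (hmem : M ∈ xs) (hmax : ∀ y ∈ xs, y ≤ M) :
    PySem.List.max? xs (fun x => x) = some M := by
  unfold PySem.List.max?
  exact pvFoldMax M _ (fun x => rfl) (fun m x => rfl) xs none hmax (Or.inl hmem)
    (fun a ha => nomatch ha)

theorem pvMin_eq (xs : List Int) (M : Int) (hmem : M ∈ xs) (hmin : ∀ y ∈ xs, M ≤ y) :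
    PySem.List.min? xs (fun x => x) = some M := by
  unfold PySem.List.min?
  exact pvFoldMin M _ (fun x => rfl) (fun m x => rfl) xs none hmin (Or.inl hmem)
    (fun a ha => nomatch ha)

theorem pvO_eq_idx (nums : List Int) (r : Nat) (h1 : 1 ≤ r) :
    pvO nums r = pvIdx nums (pvVal nums r) + 1 := by
  unfold pvO
  rw [if_neg (by omega)]

theorem pvLst_eq_map (nums : List Int) :
    PySem.List.sorted nums (fun x => x) = (List.range nums.length).map (fun k => pvVal nums (k + 1)) := by
  apply List.ext_getElem
  · rw [PySem.List.length_sorted]; simp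
  · intro k h1 h2
    simp only [List.getElem_map, List.getElem_range]
    rw [pvVal_getElem nums (k + 1) (by omega)
      (by rw [PySem.List.length_sorted] at h1; omega)]
    rfl

theorem pvLower_mem (nums : List Int) (hnd : nums.Nodup) (r : Nat)
    (h1 : 1 ≤ r) (h2 : r ≤ nums.length) (u : Int) :
    u ∈ nums.filter (fun u => decide (u < pvVal nums r) && decide (pvIdx nums u < pvIdx nums (pvVal nums r)))
      ↔ ∃ q, 1 ≤ q ∧ q ≤ nums.length ∧ q < r ∧ u = pvVal nums q ∧ pvO nums q < pvO nums r := by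
  rw [List.mem_filter]
  constructor
  · rintro ⟨humem, hcond⟩
    simp only [Bool.and_eq_true, decide_eq_true_eq] at hcond
    obtain ⟨q, hq1, hq2, hqval⟩ := pvVal_surj nums u humem
    refine ⟨q, hq1, hq2, ?_, hqval.symm, ?_⟩
    · by_contra hqr
      push Not at hqr
      rcases Nat.lt_or_ge r q with h | h
      · have := pvVal_lt nums hnd r q h1 h hq2
        omega
      · have : q = r := by omega
        subst this
        rw [hqval] at hcond
        omega
    · rw [pvO_eq_idx nums q hq1, pvO_eq_idx nums r h1, hqval]
      omega
  · rintro ⟨q, hq1, hq2, hqr, rfl, hqo⟩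
    refine ⟨pvVal_mem nums q hq1 hq2, ?_⟩
    simp only [Bool.and_eq_true, decide_eq_true_eq]
    constructor
    · exact pvVal_lt nums hnd q r hq1 hqr h2
    · rw [pvO_eq_idx nums q hq1, pvO_eq_idx nums r h1] at hqo
      omega

theorem pvUpper_mem (nums : List Int) (hnd : nums.Nodup) (r : Nat)
    (h1 : 1 ≤ r) (h2 : r ≤ nums.length) (u : Int) :
    u ∈ nums.filter (fun u => decide (pvVal nums r < u) && decide (pvIdx nums u < pvIdx nums (pvVal nums r)))
      ↔ ∃ q, 1 ≤ q ∧ q ≤ nums.length ∧ r < q ∧ u = pvVal nums q ∧ pvO nums q < pvO nums r := by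
  rw [List.mem_filter]
  constructor
  · rintro ⟨humem, hcond⟩
    simp only [Bool.and_eq_true, decide_eq_true_eq] at hcond
    obtain ⟨q, hq1, hq2, hqval⟩ := pvVal_surj nums u humem
    refine ⟨q, hq1, hq2, ?_, hqval.symm, ?_⟩
    · by_contra hqr
      push Not at hqr
      rcases Nat.lt_or_ge q r with h | h
      · have := pvVal_lt nums hnd q r hq1 h h2
        omega
      · have : q = r := by omega
        subst this
        rw [hqval] at hcond
        omega
    · rw [pvO_eq_idx nums q hq1, pvO_eq_idx nums r h1, hqval]
      omega
  · rintro ⟨q, hq1, hq2, hqr, rfl, hqo⟩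
    refine ⟨pvVal_mem nums q hq1 hq2, ?_⟩
    simp only [Bool.and_eq_true, decide_eq_true_eq]
    constructor
    · exact pvVal_lt nums hnd r q h1 hqr hq2
    · rw [pvO_eq_idx nums q hq1, pvO_eq_idx nums r h1] at hqo
      omega

theorem pvLower_max (nums : List Int) (hnd : nums.Nodup) (r : Nat)
    (h1 : 1 ≤ r) (h2 : r ≤ nums.length) :
    PySem.List.max? (nums.filter (fun u => decide (u < pvVal nums r) && decide (pvIdx nums u < pvIdx nums (pvVal nums r)))) (fun x => x)
      = if pvL nums r = 0 then none else some (pvVal nums (pvL nums r)) := by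
  by_cases hL : pvL nums r = 0
  · rw [if_pos hL]
    have hnil : nums.filter (fun u => decide (u < pvVal nums r) && decide (pvIdx nums u < pvIdx nums (pvVal nums r))) = [] := by
      rw [List.eq_nil_iff_forall_not_mem]
      intro u hu
      obtain ⟨q, hq1, hq2, hqr, _, hqo⟩ := (pvLower_mem nums hnd r h1 h2 u).1 hu
      have := Nat.le_findGreatest (P := fun l => pvO nums l < pvO nums r) (by omega : q ≤ r - 1) hqo
      unfold pvL at hL
      omega
    rw [hnil]
    rfl
  · rw [if_neg hL]
    have hspec := (Nat.findGreatest_eq_iff (P := fun l => pvO nums l < pvO nums r)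
      (k := r - 1) (m := pvL nums r)).1 rfl
    have hLle : pvL nums r ≤ r - 1 := hspec.1
    have hLP : pvO nums (pvL nums r) < pvO nums r := hspec.2.1 hL
    apply pvMax_eq
    · rw [pvLower_mem nums hnd r h1 h2]
      exact ⟨pvL nums r, by omega, by omega, by omega, rfl, hLP⟩
    · intro y hy
      obtain ⟨q, hq1, hq2, hqr, rfl, hqo⟩ := (pvLower_mem nums hnd r h1 h2 y).1 hy
      have hqL : q ≤ pvL nums r := Nat.le_findGreatest (by omega) hqo
      rcases Nat.eq_or_lt_of_le hqL with rfl | hlt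
      · exact le_rfl
      · exact le_of_lt (pvVal_lt nums hnd q (pvL nums r) hq1 hlt (by omega))

theorem pvUpper_min (nums : List Int) (hnd : nums.Nodup) (r : Nat)
    (h1 : 1 ≤ r) (h2 : r ≤ nums.length) :
    PySem.List.min? (nums.filter (fun u => decide (pvVal nums r < u) && decide (pvIdx nums u < pvIdx nums (pvVal nums r)))) (fun x => x)
      = (pvR nums r).map (pvVal nums) := by
  cases hR : pvR nums r with
  | none =>
      have hnil : nums.filter (fun u => decide (pvVal nums r < u) && decide (pvIdx nums u < pvIdx nums (pvVal nums r))) = [] := by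
        rw [List.eq_nil_iff_forall_not_mem]
        intro u hu
        obtain ⟨q, hq1, hq2, hqr, _, hqo⟩ := (pvUpper_mem nums hnd r h1 h2 u).1 hu
        unfold pvR at hR
        rw [List.head?_eq_none_iff, List.filter_eq_nil_iff] at hR
        exact absurd (by simpa using hqo)
          (by simpa using hR q (List.mem_range'_1.2 ⟨by omega, by omega⟩))
      rw [hnil]
      rfl
  | some h =>
      have hb := pvR_bounds nums r h hR
      have hmemf : h ∈ (List.range' (r + 1) (nums.length - r)).filter
          (fun h => decide (pvO nums h < pvO nums r)) := by
        unfold pvR at hR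
        exact List.mem_of_mem_head? (by rw [hR]; simp)
      have hPh : pvO nums h < pvO nums r := by
        have := List.of_mem_filter hmemf
        simpa using this
      simp only [Option.map_some]
      apply pvMin_eq
      · rw [pvUpper_mem nums hnd r h1 h2]
        exact ⟨h, by omega, by omega, by omega, rfl, hPh⟩
      · intro y hy
        obtain ⟨q, hq1, hq2, hqr, rfl, hqo⟩ := (pvUpper_mem nums hnd r h1 h2 y).1 hy
        have hqmem : q ∈ (List.range' (r + 1) (nums.length - r)).filter
            (fun h => decide (pvO nums h < pvO nums r)) := by
          apply List.mem_filter.2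
          exact ⟨List.mem_range'_1.2 ⟨by omega, by omega⟩, by simpa using hqo⟩
        have hpw : ((List.range' (r + 1) (nums.length - r)).filter
            (fun h => decide (pvO nums h < pvO nums r))).Pairwise (· < ·) :=
          (List.pairwise_lt_range' 1).filter _
        have hhq : h ≤ q := by
          unfold pvR at hR
          obtain ⟨t, ht⟩ := List.head?_eq_some_iff.1 hR
          rw [ht] at hqmem hpw
          rcases List.mem_cons.1 hqmem with rfl | hq
          · exact le_rfl
          · exact le_of_lt ((List.pairwise_cons.1 hpw).1 q hq)
        rcases Nat.eq_or_lt_of_le hhq with rfl | hlt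
        · exact le_rfl
        · exact le_of_lt (pvVal_lt nums hnd h q (by omega) hlt (by omega))

theorem pvBuildB_eq (nums : List Int) (hnd : nums.Nodup) :
    build_with_stack_alt nums = pvAssemble nums := by
  simp only [build_with_stack_alt]
  rw [pvSet_ofList_eq_self nums hnd, pvLst_eq_map nums, List.foldl_map]
  unfold pvAssemble
  apply PySem.List.foldl_congr_mem
  intro acc k hk
  have hk' : k < nums.length := List.mem_range.1 hk
  have hr1 : 1 ≤ k + 1 := by omega
  have hr2 : k + 1 ≤ nums.length := by omega
  have hvmem := pvVal_mem nums (k + 1) hr1 hr2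
  rw [pvInd_getD nums hnd _ hvmem]
  rw [List.filter_congr (l := nums)
    (p := fun u => decide (u < pvVal nums (k + 1)) &&
      decide (((PySem.List.enumerate nums).foldl (fun d p => d.insert p.2 p.1) PySem.Dict.empty).getD u 0
        < pvIdx nums (pvVal nums (k + 1))))
    (q := fun u => decide (u < pvVal nums (k + 1)) && decide (pvIdx nums u < pvIdx nums (pvVal nums (k + 1))))
    (by intro u hu; beta_reduce; rw [pvInd_getD nums hnd u hu])]
  rw [List.filter_congr (l := nums)
    (p := fun u => decide (pvVal nums (k + 1) < u) &&
      decide (((PySem.List.enumerate nums).foldl (fun d p => d.insert p.2 p.1) PySem.Dict.empty).getD u 0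
        < pvIdx nums (pvVal nums (k + 1))))
    (q := fun u => decide (pvVal nums (k + 1) < u) && decide (pvIdx nums u < pvIdx nums (pvVal nums (k + 1))))
    (by intro u hu; beta_reduce; rw [pvInd_getD nums hnd u hu])]
  rw [pvLower_max nums hnd (k + 1) hr1 hr2, pvUpper_min nums hnd (k + 1) hr1 hr2]
  by_cases hL : pvL nums (k + 1) = 0
  · rw [if_pos hL]
    cases hR : pvR nums (k + 1) with
    | none =>
        simp only [Option.map_none]
        have hF : pvF nums (k + 1) = 0 := by
          unfold pvF
          rw [hR]
          show pvL nums (k + 1) = 0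
          exact hL
        rw [hF]
        simp
    | some h =>
        simp only [Option.map_some]
        have hb := pvR_bounds nums (k + 1) h hR
        have hF : pvF nums (k + 1) = h := by
          unfold pvF
          rw [hR]
          show (if pvO nums (pvL nums (k + 1)) < pvO nums h then h else pvL nums (k + 1)) = h
          rw [hL, pvO_zero, if_pos (pvO_pos nums h (by omega) (by omega)).1]
        rw [hF, if_pos (by simp only [ne_eq, Nat.cast_eq_zero]; omega)]
        rw [pvInd_getD nums hnd _ (pvVal_mem nums h (by omega) (by omega))]
  · rw [if_neg hL]
    have hspec := (Nat.findGreatest_eq_iff (P := fun l => pvO nums l < pvO nums (k + 1))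
      (k := k + 1 - 1) (m := pvL nums (k + 1))).1 rfl
    have hLle : pvL nums (k + 1) ≤ k := by have := hspec.1; omega
    have hL1 : 1 ≤ pvL nums (k + 1) := by omega
    have hLP : pvO nums (pvL nums (k + 1)) < pvO nums (k + 1) := hspec.2.1 hL
    have hLmem := pvVal_mem nums (pvL nums (k + 1)) hL1 (by omega)
    cases hR : pvR nums (k + 1) with
    | none =>
        simp only [Option.map_none]
        have hF : pvF nums (k + 1) = pvL nums (k + 1) := by
          unfold pvF
          rw [hR]
        rw [hF, if_pos (by simp only [ne_eq, Nat.cast_eq_zero]; omega)]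
        rw [pvInd_getD nums hnd _ hLmem]
    | some h =>
        simp only [Option.map_some]
        have hb := pvR_bounds nums (k + 1) h hR
        have hmemh := pvVal_mem nums h (by omega) (by omega)
        rw [pvInd_getD nums hnd _ hmemh, pvInd_getD nums hnd _ hLmem]
        have hdist : pvO nums h ≠ pvO nums (pvL nums (k + 1)) := by
          intro hcontra
          have := pvO_inj nums hnd h (pvL nums (k + 1)) (by omega) (by omega) hcontra
          omega
        rw [pvO_eq_idx nums h (by omega), pvO_eq_idx nums (pvL nums (k + 1)) hL1] at hdist
        by_cases hc : pvIdx nums (pvVal nums h) < pvIdx nums (pvVal nums (pvL nums (k + 1)))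
        · rw [if_pos hc]
          have hF : pvF nums (k + 1) = pvL nums (k + 1) := by
            unfold pvF
            rw [hR]
            show (if pvO nums (pvL nums (k + 1)) < pvO nums h then h else pvL nums (k + 1)) = _
            rw [if_neg (by
              rw [pvO_eq_idx nums h (by omega), pvO_eq_idx nums (pvL nums (k + 1)) hL1]
              omega)]
          rw [hF, if_pos (by simp only [ne_eq, Nat.cast_eq_zero]; omega)]
          rw [pvInd_getD nums hnd _ hLmem]
        · rw [if_neg hc]
          have hF : pvF nums (k + 1) = h := by
            unfold pvF
            rw [hR]
            show (if pvO nums (pvL nums (k + 1)) < pvO nums h then h else pvL nums (k + 1)) = _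
            rw [if_pos (by
              rw [pvO_eq_idx nums h (by omega), pvO_eq_idx nums (pvL nums (k + 1)) hL1]
              omega)]
          rw [hF, if_pos (by simp only [ne_eq, Nat.cast_eq_zero]; omega)]
          rw [pvInd_getD nums hnd _ hmemh]

-- ===== VERDICT (by name: the statement is the Claim_ definition above) =====
theorem build_with_stack_spec : Claim_equal_build_with_stack := by
  intro nums _ hnd
  show build_with_stack nums = build_with_stack_alt nums
  rw [pvBuildA_eq nums hnd, pvBuildB_eq nums hnd]
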